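-- pv_equiv track=rewrite | github.com/Priyankcoder/Codechef_Long-Challenge_Solution | MARCH20B/CHPINTU.py | codechef
-- ===== SOURCE A (Python) =====
-- def codechef(f_arr,p_arr):
--     #cook your dish here
--     dic = dict()
--     zippy = list(zip(f_arr,p_arr))
--     for f,p in zippy:
--         if f in dic:
--             dic[f]+=p
--         else:
--             dic[f]=p
--     return min(dic.values())
-- ===== SOURCE B (Python) =====
-- def _group_sums(pairs):
--     # pairs is sorted by key: equal keys are consecutive; one sum per run
--     sums = []
--     i = 0
--     n = len(pairs)
--     while i < n:
--         f = pairs[i][0]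
--         s = 0
--         while i < n and pairs[i][0] == f:
--             s += pairs[i][1]
--             i += 1
--         sums.append(s)
--     return sums
--
--
-- def codechef(f_arr, p_arr):
--     pairs = sorted(zip(f_arr, p_arr), key=lambda q: q[0])
--     return min(_group_sums(pairs))
-- ===== Notes on version B (the rewrite author's own statement) =====
-- stated objective: alternative
-- what changed: Replaces hash-based accumulation into a dict by sort-then-scan: sort the (food,price) pairs by food id, sum each run of consecutive equal ids in one sequential pass, and return the min of the run sums.
import Mathlib
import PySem

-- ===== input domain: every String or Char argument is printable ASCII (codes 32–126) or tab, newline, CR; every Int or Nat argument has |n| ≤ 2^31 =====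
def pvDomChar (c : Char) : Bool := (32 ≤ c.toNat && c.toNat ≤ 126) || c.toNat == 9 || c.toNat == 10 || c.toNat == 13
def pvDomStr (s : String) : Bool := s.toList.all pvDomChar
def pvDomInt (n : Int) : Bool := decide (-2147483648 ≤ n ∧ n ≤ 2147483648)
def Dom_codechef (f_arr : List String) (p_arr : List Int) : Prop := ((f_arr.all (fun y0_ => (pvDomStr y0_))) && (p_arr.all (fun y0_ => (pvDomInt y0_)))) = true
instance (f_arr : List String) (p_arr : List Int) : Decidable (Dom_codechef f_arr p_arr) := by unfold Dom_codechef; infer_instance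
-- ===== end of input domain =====

-- B replaces A's dict accumulation by sort-then-scan (sum runs of equal keys after sorting); equivalence of the RETURN value on nonempty input.

-- ===== PORT A =====
-- the loop body: if f in dic: dic[f]+=p else: dic[f]=p
def codechefStep (d : PySem.Dict String Int) (q : String × Int) : PySem.Dict String Int :=
  if d.contains q.1 then d.insert q.1 (d.getD q.1 0 + q.2) else d.insert q.1 q.2

def codechef (f_arr : List String) (p_arr : List Int) : Int :=
  let zippy := List.zip f_arr p_arr
  let dic := zippy.foldl codechefStep PySem.Dict.empty
  (PySem.List.min? dic.values (fun x => x)).getD 0    -- min() raises on empty dict: excluded by Pre_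

-- ===== PORT B =====
-- _group_sums: outer while = one recursion step per run of equal keys;
-- inner while summing the run = foldl over the run ((f,p) :: takeWhile); the rest is dropWhile
def codechefGroup : List (String × Int) → List Int
  | [] => []
  | (f, p) :: t =>
      (((f, p) :: t.takeWhile (fun q => q.1 == f)).foldl (fun s q => s + q.2) 0)
        :: codechefGroup (t.dropWhile (fun q => q.1 == f))
termination_by l => l.length
decreasing_by
  have := List.length_dropWhile_le (fun q => q.1 == f) t
  simp only [List.length_cons]
  omega

def codechef_alt (f_arr : List String) (p_arr : List Int) : Int :=
  let pairs := PySem.List.sorted (List.zip f_arr p_arr) (fun q => q.1) false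
  (PySem.List.min? (codechefGroup pairs) (fun x => x)).getD 0  -- min() raises on empty list: excluded by Pre_

-- ===== PRECONDITION & SPEC =====
-- Pre_ excludes exactly the inputs with an empty zip, where A's min() raises ValueError (B's does too).
def Pre_codechef (f_arr : List String) (p_arr : List Int) : Prop := f_arr ≠ [] ∧ p_arr ≠ []
instance (f_arr : List String) (p_arr : List Int) : Decidable (Pre_codechef f_arr p_arr) := by unfold Pre_codechef; infer_instance
def pvWitness_codechef : List String × List Int := (["a", "b", "a"], [3, 5, 2])

def Spec_codechef (f_arr : List String) (p_arr : List Int) (out : Int) : Prop := out = codechef_alt f_arr p_arr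
instance (f_arr : List String) (p_arr : List Int) (out : Int) : Decidable (Spec_codechef f_arr p_arr out) := by unfold Spec_codechef; infer_instance

-- ===== CLAIM (what is proved, stated in full; the proofs are below) =====
def Claim_equal_codechef : Prop := ∀ (f_arr : List String) (p_arr : List Int), Dom_codechef f_arr p_arr → Pre_codechef f_arr p_arr → Spec_codechef f_arr p_arr (codechef f_arr p_arr)

-- ===== LEMMAS AND PROOFS =====

-- the per-key total of a pair list
def sumFor (l : List (String × Int)) (k : String) : Int :=
  ((l.filter (fun q => q.1 == k)).map (fun q => q.2)).sum

-- ---- A-side: the dict after the loop has the distinct keys with their totals ----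

theorem keys_codechefStep (d : PySem.Dict String Int) (q : String × Int) :
    (codechefStep d q).keys = PySem.Set.add d.keys q.1 := by
  unfold codechefStep PySem.Set.add
  by_cases h : d.contains q.1
  · simp [h, PySem.Dict.keys_insert_of_contains _ _ h,
      PySem.Set.contains, (PySem.Dict.contains_iff_mem_keys d q.1).mp h]
  · have h' : q.1 ∉ d.keys := fun hm => h ((PySem.Dict.contains_iff_mem_keys d q.1).mpr hm)
    simp [h, PySem.Dict.keys_insert_of_not_contains _ _ (by simpa using h), PySem.Set.contains, h']

theorem nodup_keys_codechefStep (d : PySem.Dict String Int) (q : String × Int)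
    (h : d.keys.Nodup) : (codechefStep d q).keys.Nodup := by
  unfold codechefStep
  by_cases hc : d.contains q.1 <;> simp [hc, PySem.Dict.nodup_keys_insert _ _ _ h]

theorem getD_codechefStep (d : PySem.Dict String Int) (q : String × Int) (k : String) :
    (codechefStep d q).getD k 0 = if q.1 = k then d.getD q.1 0 + q.2 else d.getD k 0 := by
  unfold codechefStep
  by_cases hk : q.1 = k
  · subst hk
    by_cases hc : d.contains q.1
    · simp [hc, PySem.Dict.getD_insert_self]
    · simp [hc, PySem.Dict.getD_insert_self, PySem.Dict.getD_of_not_contains d _ (by simpa using hc)]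
  · by_cases hc : d.contains q.1 <;>
      simp [hc, hk, PySem.Dict.getD_insert_of_ne _ _ _ (fun h => hk h.symm)]

theorem fold_keys (pairs : List (String × Int)) (d : PySem.Dict String Int) :
    (pairs.foldl codechefStep d).keys
      = pairs.foldl (fun ks q => PySem.Set.add ks q.1) d.keys := by
  induction pairs generalizing d with
  | nil => rfl
  | cons q t ih => simp [List.foldl_cons, ih, keys_codechefStep]

theorem fold_nodup (pairs : List (String × Int)) (d : PySem.Dict String Int)
    (h : d.keys.Nodup) : (pairs.foldl codechefStep d).keys.Nodup := by
  induction pairs generalizing d with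
  | nil => exact h
  | cons q t ih => exact ih _ (nodup_keys_codechefStep d q h)

theorem fold_getD (pairs : List (String × Int)) (d : PySem.Dict String Int) (k : String) :
    (pairs.foldl codechefStep d).getD k 0 = d.getD k 0 + sumFor pairs k := by
  induction pairs generalizing d with
  | nil => simp [sumFor]
  | cons q t ih =>
    simp only [List.foldl_cons, ih, getD_codechefStep, sumFor]
    by_cases hk : q.1 = k
    · simp [hk]; ring
    · simp [hk]

theorem valuesA (pairs : List (String × Int)) :
    (pairs.foldl codechefStep PySem.Dict.empty).values
      = (PySem.List.dedup (pairs.map (fun q => q.1))).map (fun k => sumFor pairs k) := by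
  have hnd : (pairs.foldl codechefStep PySem.Dict.empty).keys.Nodup :=
    fold_nodup pairs _ (by simp [PySem.Dict.keys_empty])
  rw [PySem.Dict.values_eq_map_keys _ hnd 0, fold_keys]
  have hk : pairs.foldl (fun ks q => PySem.Set.add ks q.1)
        (PySem.Dict.empty : PySem.Dict String Int).keys
      = PySem.List.dedup (pairs.map (fun q => q.1)) := by
    rw [PySem.List.dedup_eq_ofList, PySem.Set.ofList_eq_foldl, List.foldl_map]
    simp [PySem.Dict.keys_empty]
  rw [hk]
  apply List.map_congr_left
  intro k _
  rw [fold_getD]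
  simp [PySem.Dict.getD_empty]

-- ---- B-side: on a key-sorted list, the run sums are a permutation of the per-key totals ----

theorem foldl_add_snd (l : List (String × Int)) (a : Int) :
    l.foldl (fun s q => s + q.2) a = a + (l.map (fun q => q.2)).sum := by
  induction l generalizing a with
  | nil => simp
  | cons q t ih => simp [List.foldl_cons, ih]; ring

theorem groupSums_perm (l : List (String × Int))
    (h : l.Pairwise (fun a b => a.1 ≤ b.1)) :
    (codechefGroup l).Perm
      ((PySem.List.dedup (l.map (fun q => q.1))).map (fun k => sumFor l k)) := by
  induction l using codechefGroup.induct with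
  | case1 => simp [codechefGroup, PySem.List.dedup]
  | case2 f p t ih =>
    have hle : ∀ q ∈ t, f ≤ q.1 := fun q hq => (List.pairwise_cons.mp h).1 q hq
    have ht : t.Pairwise (fun a b => a.1 ≤ b.1) := (List.pairwise_cons.mp h).2
    set P := fun q : String × Int => q.1 == f with hP
    have hrest_sorted : (t.dropWhile P).Pairwise (fun a b => a.1 ≤ b.1) :=
      List.Pairwise.sublist (List.dropWhile_sublist _) ht
    have hrun : ∀ q ∈ t.takeWhile P, q.1 = f := by
      intro q hq
      simpa [hP] using List.mem_takeWhile_imp hq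
    -- every key in the rest is strictly above f
    have hrest : ∀ q ∈ t.dropWhile P, f < q.1 := by
      intro q hq
      rcases hd : t.dropWhile P with _ | ⟨x, r⟩
      · rw [hd] at hq; cases hq
      · have hxmem : x ∈ t := (List.dropWhile_sublist P).subset (by rw [hd]; exact List.mem_cons_self)
        have hx0 : ¬ P ((t.dropWhile P).get ⟨0, by rw [hd]; simp⟩) :=
          List.dropWhile_get_zero_not P t (by rw [hd]; simp)
        simp only [hd, List.get_eq_getElem, List.getElem_cons_zero] at hx0
        have hxne : x.1 ≠ f := by simpa [hP] using hx0
        have hxlt : f < x.1 := lt_of_le_of_ne (hle x hxmem) (Ne.symm hxne)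
        rw [hd] at hq
        rcases List.mem_cons.mp hq with rfl | hqr
        · exact hxlt
        · have : x.1 ≤ q.1 := by
            have := hrest_sorted
            rw [hd] at this
            exact (List.pairwise_cons.mp this).1 q hqr
          exact lt_of_lt_of_le hxlt this
    have hrest_ne : ∀ a, a ∈ (t.dropWhile P).map (fun q => q.1) → a ≠ f := by
      intro a ha
      rcases List.mem_map.mp ha with ⟨q, hq, rfl⟩
      exact ne_of_gt (hrest q hq)
    -- the head run sum is the total for key f
    have hhead : ((f, p) :: t.takeWhile P).foldl (fun s q => s + q.2) 0
        = sumFor ((f, p) :: t) f := by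
      rw [foldl_add_snd]
      have hfilter : ((f, p) :: t).filter (fun q => q.1 == f) = (f, p) :: t.takeWhile P := by
        have h1 : (t.takeWhile P).filter (fun q => q.1 == f) = t.takeWhile P :=
          List.filter_eq_self.mpr (fun q hq => by simp [hrun q hq])
        have h2 : (t.dropWhile P).filter (fun q => q.1 == f) = [] :=
          List.filter_eq_nil_iff.mpr (fun q hq => by simp [ne_of_gt (hrest q hq)])
        rw [List.filter_cons]
        simp only [beq_self_eq_true, if_true]
        congr 1
        conv_lhs => rw [← List.takeWhile_append_dropWhile (p := P) (l := t)]
        rw [List.filter_append, h1, h2, List.append_nil]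
      simp [sumFor, hfilter]
    -- per-key totals of keys in the rest are unaffected by the head run
    have hsum_rest : ∀ k, k ≠ f → sumFor ((f, p) :: t) k = sumFor (t.dropWhile P) k := by
      intro k hk
      unfold sumFor
      conv_lhs => rw [← List.takeWhile_append_dropWhile (p := P) (l := t)]
      rw [List.filter_cons, List.filter_append]
      have h1 : (t.takeWhile P).filter (fun q => q.1 == k) = [] :=
        List.filter_eq_nil_iff.mpr (fun q hq => by simp [hrun q hq, Ne.symm hk])
      have hf : ((f, p).1 == k) = false := by simpa using Ne.symm hk
      simp [hf, h1]
    -- the distinct keys: f followed by the distinct keys of the rest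
    have hkeysperm : (PySem.List.dedup (((f, p) :: t).map (fun q => q.1))).Perm
        (f :: PySem.List.dedup ((t.dropWhile P).map (fun q => q.1))) := by
      rw [List.perm_ext_iff_of_nodup (PySem.List.nodup_dedup _)
        (by simp only [List.nodup_cons]
            exact ⟨fun hf => hrest_ne f ((PySem.List.mem_dedup _ _).mp hf) rfl,
              PySem.List.nodup_dedup _⟩)]
      intro a
      simp only [PySem.List.mem_dedup, List.mem_cons, List.map_cons]
      constructor
      · rintro (rfl | ha)
        · exact Or.inl rfl
        · rcases List.mem_map.mp ha with ⟨q, hq, rfl⟩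
          conv at hq => rw [← List.takeWhile_append_dropWhile (p := P) (l := t)]
          rcases List.mem_append.mp hq with hq | hq
          · exact Or.inl (hrun q hq)
          · exact Or.inr (List.mem_map_of_mem hq)
      · rintro (rfl | ha)
        · exact Or.inl rfl
        · rcases List.mem_map.mp ha with ⟨q, hq, rfl⟩
          exact Or.inr (List.mem_map_of_mem ((List.dropWhile_sublist P).subset hq))
    -- assemble
    have hmapeq : (PySem.List.dedup ((t.dropWhile P).map (fun q => q.1))).map
          (fun k => sumFor (t.dropWhile P) k)
        = (PySem.List.dedup ((t.dropWhile P).map (fun q => q.1))).map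
          (fun k => sumFor ((f, p) :: t) k) :=
      List.map_congr_left (fun k hk =>
        (hsum_rest k (hrest_ne k ((PySem.List.mem_dedup _ _).mp hk))).symm)
    simp only [codechefGroup]
    simp only [← hP]
    refine List.Perm.trans ?_ (List.Perm.map (fun k => sumFor ((f, p) :: t) k) hkeysperm.symm)
    simp only [List.map_cons]
    rw [hhead]
    exact List.Perm.cons _ (hmapeq ▸ ih hrest_sorted)

-- ---- min (with identity key) only depends on the multiset of values ----

theorem min?_id_perm (xs ys : List Int) (h : xs.Perm ys) :
    PySem.List.min? xs (fun x => x) = PySem.List.min? ys (fun x => x) := by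
  rcases hx : PySem.List.min? xs (fun x => x) with _ | m1 <;>
    rcases hy : PySem.List.min? ys (fun x => x) with _ | m2
  · rfl
  · exfalso
    have hxs : xs = [] := (PySem.List.min?_eq_none_iff _ _).mp hx
    subst hxs
    have hys : ys = [] := h.symm.eq_nil
    subst hys
    rw [(PySem.List.min?_eq_none_iff ([] : List Int) (fun x => x)).mpr rfl] at hy
    cases hy
  · exfalso
    have hys : ys = [] := (PySem.List.min?_eq_none_iff _ _).mp hy
    subst hys
    have hxs : xs = [] := h.eq_nil
    subst hxs
    rw [(PySem.List.min?_eq_none_iff ([] : List Int) (fun x => x)).mpr rfl] at hx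
    cases hx
  · have hm1 : m1 ∈ xs := PySem.List.min?_mem hx
    have hm2 : m2 ∈ ys := PySem.List.min?_mem hy
    have h12 : m1 ≤ m2 := PySem.List.min?_isMin hx m2 (h.mem_iff.mpr hm2)
    have h21 : m2 ≤ m1 := PySem.List.min?_isMin hy m1 (h.mem_iff.mp hm1)
    exact congrArg some (le_antisymm h12 h21)

-- ===== VERDICT (by name: the statement is the Claim_ definition above) =====
theorem codechef_spec : Claim_equal_codechef := by
  intro f_arr p_arr _ _
  unfold Spec_codechef codechef codechef_alt
  simp only []
  set pairs := List.zip f_arr p_arr with hp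
  set spairs := PySem.List.sorted pairs (fun q => q.1) false with hs
  have hperm : spairs.Perm pairs := PySem.List.sorted_perm pairs (fun q => q.1) false
  have hsorted : spairs.Pairwise (fun a b => a.1 ≤ b.1) :=
    PySem.List.sorted_pairwise pairs (fun q => q.1)
  -- per-key totals agree between the sorted and unsorted pair lists
  have hsum : ∀ k, sumFor spairs k = sumFor pairs k := by
    intro k
    unfold sumFor
    exact ((hperm.filter _).map _).sum_eq
  -- the distinct keys agree up to permutation
  have hkeys : (PySem.List.dedup (spairs.map (fun q => q.1))).Perm
      (PySem.List.dedup (pairs.map (fun q => q.1))) := by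
    rw [List.perm_ext_iff_of_nodup (PySem.List.nodup_dedup _) (PySem.List.nodup_dedup _)]
    intro a
    simp only [PySem.List.mem_dedup]
    exact (hperm.map (fun q => q.1)).mem_iff
  have hB : (codechefGroup spairs).Perm
      ((PySem.List.dedup (pairs.map (fun q => q.1))).map (fun k => sumFor pairs k)) := by
    refine (groupSums_perm spairs hsorted).trans ?_
    refine (List.Perm.of_eq (List.map_congr_left (fun k _ => hsum k))).trans ?_
    exact List.Perm.map _ hkeys
  rw [valuesA pairs, min?_id_perm _ _ (hB.symm)]
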